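-- pv_equiv track=rewrite | github.com/mhamida292/FinanceManager | apps/banking/views.py | _page_window
-- ===== SOURCE A (Python) =====
-- def _page_window(current: int, total: int, edge: int = 1, around: int = 2) -> list[int | None]:
--     """Numbered-pagination window. Always shows pages 1..edge, total-edge+1..total, and current ± around. None entries are ellipsis gaps."""
--     if total <= edge * 2 + around * 2 + 1:
--         return list(range(1, total + 1))
--     pages = set(range(1, edge + 1))
--     pages.update(range(total - edge + 1, total + 1))
--     pages.update(range(max(1, current - around), min(total, current + around) + 1))
--     out: list[int | None] = []
--     prev = 0
--     for p in sorted(pages):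
--         if p > prev + 1:
--             out.append(None)
--         out.append(p)
--         prev = p
--     return out
-- ===== SOURCE B (Python) =====
-- def _page_window(current: int, total: int, edge: int = 1, around: int = 2) -> list[int | None]:
--     """Numbered-pagination window. Always shows pages 1..edge, total-edge+1..total, and current ± around. None entries are ellipsis gaps."""
--     if total <= edge * 2 + around * 2 + 1:
--         return list(range(1, total + 1))
--     spans = [(1, edge),
--              (max(1, current - around), min(total, current + around)),
--              (total - edge + 1, total)]
--     merged: list[tuple[int, int]] = []
--     for lo, hi in sorted(s for s in spans if s[0] <= s[1]):
--         if merged and lo <= merged[-1][1] + 1: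
--             merged[-1] = (merged[-1][0], max(merged[-1][1], hi))
--         else:
--             merged.append((lo, hi))
--     out: list[int | None] = []
--     prev = 0
--     for lo, hi in merged:
--         if lo > prev + 1:
--             out.append(None)
--         out.extend(range(lo, hi + 1))
--         prev = hi
--     return out
-- ===== Notes on version B (the rewrite author's own statement) =====
-- stated objective: alternative
-- what changed: Instead of materialising the page set from three ranges, sorting it and gap-walking page by page, B sorts and merges the three (lo,hi) intervals themselves and emits each merged block with one ellipsis check per block.
import Mathlib
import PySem

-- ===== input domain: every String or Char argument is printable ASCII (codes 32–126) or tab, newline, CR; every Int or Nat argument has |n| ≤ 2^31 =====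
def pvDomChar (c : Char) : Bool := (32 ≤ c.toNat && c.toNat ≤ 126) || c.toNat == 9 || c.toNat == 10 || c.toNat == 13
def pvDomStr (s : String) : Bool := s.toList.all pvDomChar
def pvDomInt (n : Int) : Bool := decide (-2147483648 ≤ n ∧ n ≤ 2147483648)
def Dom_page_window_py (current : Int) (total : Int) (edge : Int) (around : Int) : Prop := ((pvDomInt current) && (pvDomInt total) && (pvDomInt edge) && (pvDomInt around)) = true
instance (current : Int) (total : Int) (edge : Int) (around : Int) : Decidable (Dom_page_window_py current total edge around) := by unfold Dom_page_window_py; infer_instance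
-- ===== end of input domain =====

-- B replaces set-building + element sort + page-by-page gap walk by sorting and merging
-- the three (lo,hi) spans and emitting whole blocks; return values are proved equal on all inputs.

-- ===== PORT A =====
-- loop body of A's 'for p in sorted(pages)'
def pwBodyA (st : List (Option Int) × Int) (p : Int) : List (Option Int) × Int :=
  ((if p > st.2 + 1 then st.1 ++ [none] else st.1) ++ [some p], p)

def page_window_py (current : Int) (total : Int) (edge : Int) (around : Int) : List (Option Int) :=
  if total ≤ edge * 2 + around * 2 + 1 then
    (PySem.List.pyRange 1 (total + 1) 1).map some
  else
    let pages : PySem.Set Int := PySem.Set.ofList (PySem.List.pyRange 1 (edge + 1) 1)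
    let pages := PySem.Set.update pages (PySem.List.pyRange (total - edge + 1) (total + 1) 1)
    let pages := PySem.Set.update pages
      (PySem.List.pyRange (max 1 (current - around)) (min total (current + around) + 1) 1)
    ((PySem.List.sorted pages (fun x => x) false).foldl pwBodyA ([], 0)).1

-- ===== PORT B =====
-- list(range(lo, hi + 1)) for a span
def pwRng (m : Int × Int) : List Int := PySem.List.pyRange m.1 (m.2 + 1) 1

-- body of B's merge loop: 'if merged and lo <= merged[-1][1] + 1: merged[-1] = …  else: merged.append(…)'
def pwMergeStep (acc : List (Int × Int)) (m : Int × Int) : List (Int × Int) :=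
  match acc.getLast? with
  | some l => if m.1 ≤ l.2 + 1 then acc.dropLast ++ [(l.1, max l.2 m.2)] else acc ++ [m]
  | none => acc ++ [m]

-- body of B's emission loop over merged spans
def pwBodyB (st : List (Option Int) × Int) (m : Int × Int) : List (Option Int) × Int :=
  ((if m.1 > st.2 + 1 then st.1 ++ [none] else st.1) ++ (pwRng m).map some, m.2)

def page_window_py_alt (current : Int) (total : Int) (edge : Int) (around : Int) : List (Option Int) :=
  if total ≤ edge * 2 + around * 2 + 1 then
    (PySem.List.pyRange 1 (total + 1) 1).map some
  else
    let spans : List (Int × Int) :=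
      [(1, edge), (max 1 (current - around), min total (current + around)), (total - edge + 1, total)]
    let merged := (PySem.List.sorted2 (spans.filter (fun s => decide (s.1 ≤ s.2)))
        (fun s => s.1) (fun s => s.2) false).foldl pwMergeStep []
    (merged.foldl pwBodyB ([], 0)).1

-- ===== PRECONDITION & SPEC =====
def Spec_page_window_py (current : Int) (total : Int) (edge : Int) (around : Int) (out : List (Option Int)) : Prop := out = page_window_py_alt current total edge around
instance (current : Int) (total : Int) (edge : Int) (around : Int) (out : List (Option Int)) : Decidable (Spec_page_window_py current total edge around out) := by unfold Spec_page_window_py; infer_instance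

-- ===== CLAIM (what is proved, stated in full; the proofs are below) =====
def Claim_equal_page_window_py : Prop := ∀ (current : Int) (total : Int) (edge : Int) (around : Int), Dom_page_window_py current total edge around → Spec_page_window_py current total edge around (page_window_py current total edge around)

-- ===== LEMMAS AND PROOFS =====

-- x is covered by some span of ms
def pwCover (ms : List (Int × Int)) (x : Int) : Prop := ∃ m ∈ ms, m.1 ≤ x ∧ x ≤ m.2

-- spans in strictly increasing order with a real gap between consecutive ones
def pwGap (a b : Int × Int) : Prop := a.2 + 1 < b.1

-- the comparator sorted2 uses for key pair (fst, snd)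
theorem pw_insertBy_pairwise (x : Int × Int) (ys : List (Int × Int))
    (h : ys.Pairwise (fun a b => a.1 ≤ b.1)) :
    (PySem.List.insertBy
      (fun a b : Int × Int => decide (a.1 < b.1) || !decide (b.1 < a.1) && decide (a.2 < b.2)) x ys).Pairwise
      (fun a b => a.1 ≤ b.1) := by
  induction ys with
  | nil => simp [PySem.List.insertBy]
  | cons y ys ih =>
    rw [List.pairwise_cons] at h
    rw [PySem.List.insertBy]
    split_ifs with hb
    · simp only [Bool.or_eq_true, Bool.and_eq_true, Bool.not_eq_true', decide_eq_true_eq,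
        decide_eq_false_iff_not] at hb
      have hxy : x.1 ≤ y.1 := by rcases hb with h1 | ⟨h1, _⟩ <;> omega
      refine List.pairwise_cons.2 ⟨?_, List.pairwise_cons.2 ⟨h.1, h.2⟩⟩
      intro z hz
      rcases List.mem_cons.1 hz with rfl | hz
      · exact hxy
      · exact le_trans hxy (h.1 z hz)
    · have hyx : y.1 ≤ x.1 := by
        by_contra hc
        exact hb (by simp only [Bool.or_eq_true, decide_eq_true_eq]; left; omega)
      refine List.pairwise_cons.2 ⟨?_, ih h.2⟩
      intro z hz
      rcases (PySem.List.mem_insertBy _ _ _ _).1 hz with rfl | hz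
      · exact hyx
      · exact h.1 z hz

theorem pw_sorted2_pairwise_fst (xs : List (Int × Int)) :
    (PySem.List.sorted2 xs (fun s => s.1) (fun s => s.2) false).Pairwise (fun a b => a.1 ≤ b.1) := by
  rw [PySem.List.sorted2]
  simp only [if_neg (by decide : ¬ (false = true))]
  suffices h : ∀ (l : List (Int × Int)) (acc : List (Int × Int)),
      acc.Pairwise (fun a b => a.1 ≤ b.1) →
      (l.foldl (fun acc x => PySem.List.insertBy
        (fun a b : Int × Int => decide (a.1 < b.1) || !decide (b.1 < a.1) && decide (a.2 < b.2)) x acc) acc).Pairwise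
        (fun a b => a.1 ≤ b.1) by
    exact h xs [] List.Pairwise.nil
  intro l
  induction l with
  | nil => intro acc hacc; exact hacc
  | cons x t ih => intro acc hacc; exact ih _ (pw_insertBy_pairwise x acc hacc)

theorem pw_mergeStep_spec (acc : List (Int × Int)) (m : Int × Int)
    (hne : ∀ p ∈ acc, p.1 ≤ p.2) (hgap : acc.Pairwise pwGap)
    (hle : ∀ p ∈ acc, p.1 ≤ m.1) (hm : m.1 ≤ m.2) :
    (∀ p ∈ pwMergeStep acc m, p.1 ≤ p.2) ∧
    (pwMergeStep acc m).Pairwise pwGap ∧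
    (∀ p ∈ pwMergeStep acc m, p.1 ≤ m.1) ∧
    (∀ x, pwCover (pwMergeStep acc m) x ↔ pwCover acc x ∨ (m.1 ≤ x ∧ x ≤ m.2)) := by
  rcases acc.eq_nil_or_concat with rfl | ⟨init, l, rfl⟩
  · refine ⟨?_, ?_, ?_, ?_⟩ <;> simp [pwMergeStep, pwCover, hm]
  · simp only [List.concat_eq_append] at hne hgap hle ⊢
    have hl2 : l.1 ≤ l.2 := hne l (by simp)
    have hlm : l.1 ≤ m.1 := hle l (by simp)
    rw [List.pairwise_append] at hgap
    obtain ⟨hgi, -, hcross⟩ := hgap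
    have hcl : ∀ a ∈ init, a.2 + 1 < l.1 := fun a ha => hcross a ha l (by simp)
    have hstep : pwMergeStep (init ++ [l]) m =
        if m.1 ≤ l.2 + 1 then init ++ [(l.1, max l.2 m.2)] else (init ++ [l]) ++ [m] := by
      simp [pwMergeStep]
    rw [hstep]
    split_ifs with hml
    · refine ⟨?_, ?_, ?_, ?_⟩
      · intro p hp
        rcases List.mem_append.1 hp with hp | hp
        · exact hne p (List.mem_append.2 (Or.inl hp))
        · rw [List.mem_singleton] at hp; subst hp; simp; omega
      · rw [List.pairwise_append]
        refine ⟨hgi, List.pairwise_singleton _ _, ?_⟩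
        intro a ha b hb
        rw [List.mem_singleton] at hb; subst hb
        exact hcl a ha
      · intro p hp
        rcases List.mem_append.1 hp with hp | hp
        · exact hle p (List.mem_append.2 (Or.inl hp))
        · rw [List.mem_singleton] at hp; subst hp; exact hlm
      · intro x
        constructor
        · rintro ⟨p, hp, h1, h2⟩
          rcases List.mem_append.1 hp with hp | hp
          · exact Or.inl ⟨p, List.mem_append.2 (Or.inl hp), h1, h2⟩
          · rw [List.mem_singleton] at hp; subst hp
            simp only at h1 h2
            by_cases hx : x ≤ l.2
            · exact Or.inl ⟨l, List.mem_append.2 (Or.inr (List.mem_singleton.2 rfl)), h1, hx⟩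
            · refine Or.inr ⟨by omega, by omega⟩
        · rintro (⟨p, hp, h1, h2⟩ | ⟨h1, h2⟩)
          · rcases List.mem_append.1 hp with hp | hp
            · exact ⟨p, List.mem_append.2 (Or.inl hp), h1, h2⟩
            · rw [List.mem_singleton] at hp; subst hp
              exact ⟨_, List.mem_append.2 (Or.inr (List.mem_singleton.2 rfl)), h1, by simp; omega⟩
          · exact ⟨_, List.mem_append.2 (Or.inr (List.mem_singleton.2 rfl)), by simp; omega, by simp; omega⟩
    · refine ⟨?_, ?_, ?_, ?_⟩
      · intro p hp
        rcases List.mem_append.1 hp with hp | hp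
        · exact hne p hp
        · rw [List.mem_singleton] at hp; subst hp; exact hm
      · rw [List.pairwise_append]
        refine ⟨List.pairwise_append.2 ⟨hgi, List.pairwise_singleton _ _, hcross⟩,
          List.pairwise_singleton _ _, ?_⟩
        intro a ha b hb
        rw [List.mem_singleton] at hb; subst hb
        rcases List.mem_append.1 ha with ha | ha
        · have := hcl a ha; unfold pwGap; omega
        · rw [List.mem_singleton] at ha; subst ha; unfold pwGap; omega
      · intro p hp
        rcases List.mem_append.1 hp with hp | hp
        · exact hle p hp
        · rw [List.mem_singleton] at hp; subst hp; exact le_refl _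
      · intro x
        constructor
        · rintro ⟨p, hp, h1, h2⟩
          rcases List.mem_append.1 hp with hp | hp
          · exact Or.inl ⟨p, hp, h1, h2⟩
          · rw [List.mem_singleton] at hp; subst hp; exact Or.inr ⟨h1, h2⟩
        · rintro (⟨p, hp, h1, h2⟩ | ⟨h1, h2⟩)
          · exact ⟨p, List.mem_append.2 (Or.inl hp), h1, h2⟩
          · exact ⟨m, List.mem_append.2 (Or.inr (List.mem_singleton.2 rfl)), h1, h2⟩

theorem pw_mergeFold_spec (ivs : List (Int × Int)) : ∀ (acc : List (Int × Int)),
    (∀ p ∈ acc, p.1 ≤ p.2) → acc.Pairwise pwGap →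
    (∀ p ∈ acc, ∀ q ∈ ivs, p.1 ≤ q.1) →
    ivs.Pairwise (fun a b => a.1 ≤ b.1) → (∀ q ∈ ivs, q.1 ≤ q.2) →
    (∀ p ∈ ivs.foldl pwMergeStep acc, p.1 ≤ p.2) ∧
    (ivs.foldl pwMergeStep acc).Pairwise pwGap ∧
    (∀ x, pwCover (ivs.foldl pwMergeStep acc) x ↔ pwCover acc x ∨ pwCover ivs x) := by
  induction ivs with
  | nil =>
    intro acc h1 h2 _ _ _
    refine ⟨h1, h2, fun x => ?_⟩
    simp [pwCover]
  | cons m rest ih =>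
    intro acc h1 h2 h3 h4 h5
    rw [List.pairwise_cons] at h4
    obtain ⟨hstep1, hstep2, hstep3, hstep4⟩ :=
      pw_mergeStep_spec acc m h1 h2 (fun p hp => h3 p hp m List.mem_cons_self)
        (h5 m List.mem_cons_self)
    rw [List.foldl_cons]
    obtain ⟨r1, r2, r3⟩ := ih (pwMergeStep acc m) hstep1 hstep2
      (fun p hp q hq => le_trans (hstep3 p hp) (h4.1 q hq)) h4.2
      (fun q hq => h5 q (List.mem_cons_of_mem _ hq))
    refine ⟨r1, r2, fun x => ?_⟩
    rw [r3 x, hstep4 x]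
    have : pwCover (m :: rest) x ↔ (m.1 ≤ x ∧ x ≤ m.2) ∨ pwCover rest x := by
      simp [pwCover, List.mem_cons, or_and_right, exists_or]
    rw [this]
    tauto

theorem pw_flat_mem (ms : List (Int × Int)) (x : Int) :
    x ∈ ms.flatMap pwRng ↔ pwCover ms x := by
  simp only [List.mem_flatMap, pwRng, PySem.List.mem_pyRange_one, pwCover]
  exact exists_congr fun m => and_congr_right fun _ => by omega

theorem pw_flat_pairwise (ms : List (Int × Int)) (h2 : ms.Pairwise pwGap) :
    (ms.flatMap pwRng).Pairwise (· < ·) := by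
  induction ms with
  | nil => simp
  | cons m rest ih =>
    rw [List.pairwise_cons] at h2
    rw [List.flatMap_cons, List.pairwise_append]
    refine ⟨PySem.List.pairwise_lt_pyRange_one _ _, ih h2.2, ?_⟩
    intro a ha b hb
    rw [pwRng, PySem.List.mem_pyRange_one] at ha
    rw [List.mem_flatMap] at hb
    obtain ⟨q, hq, hbq⟩ := hb
    rw [pwRng, PySem.List.mem_pyRange_one] at hbq
    have := h2.1 q hq
    unfold pwGap at this
    omega

-- contiguous run: the gap-walk over lo..lo+n-1 starting at prev = lo-1 just copies the pages
theorem pw_contig (n : Nat) : ∀ (lo : Int) (out : List (Option Int)),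
    (PySem.List.pyRange lo (lo + (n : Int)) 1).foldl pwBodyA (out, lo - 1) =
      (out ++ (PySem.List.pyRange lo (lo + (n : Int)) 1).map some, lo - 1 + (n : Int)) := by
  induction n with
  | zero =>
    intro lo out
    rw [PySem.List.pyRange_one_eq_nil (by omega)]
    simp
  | succ k ih =>
    intro lo out
    rw [PySem.List.pyRange_one_cons (by omega : lo < lo + ((k + 1 : Nat) : Int))]
    rw [List.foldl_cons, List.map_cons]
    have hstep : pwBodyA (out, lo - 1) lo = (out ++ [some lo], lo) := by
      unfold pwBodyA
      rw [if_neg (by omega)]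
    rw [hstep]
    have h1 := ih (lo + 1) (out ++ [some lo])
    rw [show (lo + 1) + ((k : Nat) : Int) = lo + ((k + 1 : Nat) : Int) from by push_cast; ring] at h1
    rw [show (lo + 1) - 1 = lo from by ring] at h1
    rw [h1, List.append_assoc, List.singleton_append]
    simp only [Prod.mk.injEq]
    exact ⟨trivial, by push_cast; ring⟩

theorem pw_body_range (m : Int × Int) (hm : m.1 ≤ m.2) (st : List (Option Int) × Int) :
    (pwRng m).foldl pwBodyA st = pwBodyB st m := by
  obtain ⟨out, prev⟩ := st
  have hn : m.2 + 1 = m.1 + ((m.2 + 1 - m.1).toNat : Int) := by omega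
  rw [pwRng, hn]
  obtain ⟨k, hk⟩ : ∃ k : Nat, (m.2 + 1 - m.1).toNat = k + 1 :=
    ⟨(m.2 - m.1).toNat, by omega⟩
  rw [hk]
  rw [PySem.List.pyRange_one_cons (by push_cast; omega : m.1 < m.1 + ((k + 1 : Nat) : Int))]
  rw [List.foldl_cons]
  have hstep : pwBodyA (out, prev) m.1 =
      ((if m.1 > prev + 1 then out ++ [none] else out) ++ [some m.1], m.1) := rfl
  rw [hstep]
  have h1 := pw_contig k (m.1 + 1) ((if m.1 > prev + 1 then out ++ [none] else out) ++ [some m.1])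
  rw [show (m.1 + 1) + ((k : Nat) : Int) = m.1 + ((k + 1 : Nat) : Int) from by push_cast; ring] at h1
  rw [show (m.1 + 1) - 1 = m.1 from by ring] at h1
  rw [h1]
  unfold pwBodyB
  rw [pwRng, hn, hk]
  rw [PySem.List.pyRange_one_cons (by push_cast; omega : m.1 < m.1 + ((k + 1 : Nat) : Int))]
  rw [List.map_cons, List.append_assoc, List.singleton_append]
  simp only [Prod.mk.injEq]
  exact ⟨trivial, by omega⟩

theorem pw_emit (ms : List (Int × Int)) (h : ∀ m ∈ ms, m.1 ≤ m.2) :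
    ∀ st, (ms.flatMap pwRng).foldl pwBodyA st = ms.foldl pwBodyB st := by
  induction ms with
  | nil => intro st; simp
  | cons m rest ih =>
    intro st
    rw [List.flatMap_cons, List.foldl_append, pw_body_range m (h m List.mem_cons_self),
      List.foldl_cons]
    exact ih (fun q hq => h q (List.mem_cons_of_mem _ hq)) _

theorem page_window_py_eq (current total edge around : Int) :
    page_window_py current total edge around = page_window_py_alt current total edge around := by
  unfold page_window_py page_window_py_alt
  by_cases hg : total ≤ edge * 2 + around * 2 + 1
  · simp [hg]
  · simp only [if_neg hg]
    set spans : List (Int × Int) :=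
      [(1, edge), (max 1 (current - around), min total (current + around)), (total - edge + 1, total)] with hspans
    set ivs := PySem.List.sorted2 (spans.filter (fun s => decide (s.1 ≤ s.2)))
      (fun s => s.1) (fun s => s.2) false with hivs
    have hivs_pw : ivs.Pairwise (fun a b => a.1 ≤ b.1) := pw_sorted2_pairwise_fst _
    have hivs_ne : ∀ q ∈ ivs, q.1 ≤ q.2 := by
      intro q hq
      have : q ∈ spans.filter (fun s => decide (s.1 ≤ s.2)) :=
        (PySem.List.sorted2_perm _ _ _ _).subset hq
      exact of_decide_eq_true (List.mem_filter.1 this).2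
    obtain ⟨hm1, hm2, hm3⟩ := pw_mergeFold_spec ivs []
      (by simp) List.Pairwise.nil (by simp) hivs_pw hivs_ne
    set merged := ivs.foldl pwMergeStep [] with hmerged
    have hcover : ∀ x, pwCover merged x ↔ pwCover spans x := by
      intro x
      rw [hm3 x]
      have h1 : pwCover ivs x ↔ pwCover (spans.filter (fun s => decide (s.1 ≤ s.2))) x := by
        unfold pwCover
        constructor <;> rintro ⟨m, hm, h⟩
        · exact ⟨m, (PySem.List.sorted2_perm _ _ _ _).subset hm, h⟩
        · exact ⟨m, (PySem.List.sorted2_perm _ _ _ _).mem_iff.2 hm, h⟩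
      have h2 : pwCover (spans.filter (fun s => decide (s.1 ≤ s.2))) x ↔ pwCover spans x := by
        unfold pwCover
        constructor <;> rintro ⟨m, hm, h⟩
        · exact ⟨m, List.mem_of_mem_filter hm, h⟩
        · exact ⟨m, List.mem_filter.2 ⟨hm, decide_eq_true (by omega)⟩, h⟩
      rw [h1, h2]
      simp [pwCover]
    have hsorted_eq :
        PySem.List.sorted
          (PySem.Set.update
            (PySem.Set.update (PySem.Set.ofList (PySem.List.pyRange 1 (edge + 1) 1))
              (PySem.List.pyRange (total - edge + 1) (total + 1) 1))
            (PySem.List.pyRange (max 1 (current - around)) (min total (current + around) + 1) 1))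
          (fun x => x) false = merged.flatMap pwRng := by
      apply PySem.List.sorted_eq_of_perm_of_pairwise_lt
      · rw [List.perm_ext_iff_of_nodup]
        · intro a
          rw [pw_flat_mem, hcover a]
          simp only [PySem.Set.mem_update, PySem.Set.mem_ofList, PySem.List.mem_pyRange_one,
            hspans, pwCover, List.mem_cons, List.not_mem_nil, or_false, Prod.exists,
            Prod.mk.injEq]
          constructor
          · rintro ⟨lo, hi, (⟨rfl, rfl⟩ | ⟨rfl, rfl⟩ | ⟨rfl, rfl⟩), h1, h2⟩ <;> omega
          · rintro ((⟨h1, h2⟩ | ⟨h1, h2⟩) | ⟨h1, h2⟩)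
            · exact ⟨1, edge, Or.inl ⟨rfl, rfl⟩, by omega, by omega⟩
            · exact ⟨total - edge + 1, total, Or.inr (Or.inr ⟨rfl, rfl⟩), by omega, by omega⟩
            · exact ⟨max 1 (current - around), min total (current + around),
                Or.inr (Or.inl ⟨rfl, rfl⟩), by omega, by omega⟩
        · exact (pw_flat_pairwise merged hm2).imp fun h => ne_of_lt h
        · exact PySem.Set.nodup_update _ _ (PySem.Set.nodup_update _ _ (PySem.Set.nodup_ofList _))
      · exact pw_flat_pairwise merged hm2
    rw [hsorted_eq, pw_emit merged hm1 ([], 0)]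

-- ===== VERDICT (by name: the statement is the Claim_ definition above) =====
theorem page_window_py_spec : Claim_equal_page_window_py := by
  intro current total edge around _
  unfold Spec_page_window_py
  exact page_window_py_eq current total edge around
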